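-- pv_equiv track=rewrite | github.com/parkjunhoo229/25_capstone_agent | followup_utils.py | has_remaining_symptoms
-- ===== SOURCE A (Python) =====
-- def has_remaining_symptoms(disease_candidates, confirmed_symptoms, disease_data, skipped_symptoms=None):
--     if skipped_symptoms is None:
--         skipped_symptoms = []
--
--     already_asked = set(confirmed_symptoms) | set(skipped_symptoms)
--
--     for disease in disease_candidates:
--         if disease not in disease_data:
--             continue
--         symptoms = disease_data[disease].get("symptoms", [])
--         remaining = [s for s in symptoms if s not in already_asked]
--         if remaining:
--             return True
--     return False
-- ===== SOURCE B (Python) =====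
-- def has_remaining_symptoms(disease_candidates, confirmed_symptoms, disease_data, skipped_symptoms=None):
--     already_asked = set(confirmed_symptoms) | set(skipped_symptoms or [])
--     all_symptoms = set()
--     for disease in disease_candidates:
--         if disease in disease_data:
--             all_symptoms |= set(disease_data[disease].get("symptoms", []))
--     return bool(all_symptoms - already_asked)
-- ===== Notes on version B (the rewrite author's own statement) =====
-- stated objective: alternative
-- what changed: Instead of scanning each disease's symptoms with an inner remaining-list comprehension and early-returning, B aggregates all candidate diseases' symptoms into one set and answers with a single set-difference against the already-asked set.
import Mathlib
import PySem

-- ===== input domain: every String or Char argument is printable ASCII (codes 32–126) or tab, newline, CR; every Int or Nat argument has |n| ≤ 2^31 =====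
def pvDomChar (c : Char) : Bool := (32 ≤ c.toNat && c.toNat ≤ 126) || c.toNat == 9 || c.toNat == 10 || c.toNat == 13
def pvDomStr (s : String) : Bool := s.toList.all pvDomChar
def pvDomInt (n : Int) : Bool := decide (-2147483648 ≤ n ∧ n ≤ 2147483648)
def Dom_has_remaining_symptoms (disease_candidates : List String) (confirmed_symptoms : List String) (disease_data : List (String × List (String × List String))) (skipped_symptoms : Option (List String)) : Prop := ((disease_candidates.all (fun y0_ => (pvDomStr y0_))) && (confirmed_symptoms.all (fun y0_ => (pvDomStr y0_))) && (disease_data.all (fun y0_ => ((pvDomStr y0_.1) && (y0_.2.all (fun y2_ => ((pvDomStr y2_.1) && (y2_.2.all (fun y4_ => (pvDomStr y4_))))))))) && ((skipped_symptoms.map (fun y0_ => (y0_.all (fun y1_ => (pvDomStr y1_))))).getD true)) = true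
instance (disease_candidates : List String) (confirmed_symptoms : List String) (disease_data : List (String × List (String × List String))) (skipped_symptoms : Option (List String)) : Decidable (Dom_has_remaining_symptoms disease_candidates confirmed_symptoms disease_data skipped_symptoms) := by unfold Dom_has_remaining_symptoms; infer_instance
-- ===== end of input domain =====

-- B replaces A's per-disease inner 'remaining' scan with early return by one aggregated symptom set
-- and a single final set-difference (alternative decomposition, same cost).

-- ===== PORT A =====
-- the for-loop of A with its early 'return True'
def hrsLoopA (disease_data : List (String × List (String × List String)))
    (already_asked : PySem.Set String) : List String → Bool
  | [] => false
  | disease :: rest =>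
    if (PySem.Dict.mk disease_data).contains disease = false then
      hrsLoopA disease_data already_asked rest
    else
      let symptoms := PySem.Dict.getD (PySem.Dict.mk ((PySem.Dict.mk disease_data).getD disease [])) "symptoms" []
      let remaining := symptoms.filter (fun s => !(PySem.Set.contains already_asked s))
      if remaining.isEmpty = false then true
      else hrsLoopA disease_data already_asked rest

def has_remaining_symptoms (disease_candidates : List String) (confirmed_symptoms : List String) (disease_data : List (String × List (String × List String))) (skipped_symptoms : Option (List String)) : Bool :=
  let skipped := skipped_symptoms.getD []
  let already_asked := PySem.Set.union (PySem.Set.ofList confirmed_symptoms) (PySem.Set.ofList skipped)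
  hrsLoopA disease_data already_asked disease_candidates

-- ===== PORT B =====
def has_remaining_symptoms_alt (disease_candidates : List String) (confirmed_symptoms : List String) (disease_data : List (String × List (String × List String))) (skipped_symptoms : Option (List String)) : Bool :=
  let already_asked := PySem.Set.union (PySem.Set.ofList confirmed_symptoms) (PySem.Set.ofList (skipped_symptoms.getD []))
  let all_symptoms := disease_candidates.foldl (fun acc disease =>
      if (PySem.Dict.mk disease_data).contains disease then
        PySem.Set.union acc (PySem.Set.ofList (PySem.Dict.getD (PySem.Dict.mk ((PySem.Dict.mk disease_data).getD disease [])) "symptoms" []))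
      else acc) PySem.Set.empty
  !(PySem.Set.diff all_symptoms already_asked).isEmpty

-- ===== PRECONDITION & SPEC =====
def Spec_has_remaining_symptoms (disease_candidates : List String) (confirmed_symptoms : List String) (disease_data : List (String × List (String × List String))) (skipped_symptoms : Option (List String)) (out : Bool) : Prop := out = has_remaining_symptoms_alt disease_candidates confirmed_symptoms disease_data skipped_symptoms
instance (disease_candidates : List String) (confirmed_symptoms : List String) (disease_data : List (String × List (String × List String))) (skipped_symptoms : Option (List String)) (out : Bool) : Decidable (Spec_has_remaining_symptoms disease_candidates confirmed_symptoms disease_data skipped_symptoms out) := by unfold Spec_has_remaining_symptoms; infer_instance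

-- ===== CLAIM (what is proved, stated in full; the proofs are below) =====
def Claim_equal_has_remaining_symptoms : Prop := ∀ (disease_candidates : List String) (confirmed_symptoms : List String) (disease_data : List (String × List (String × List String))) (skipped_symptoms : Option (List String)), Dom_has_remaining_symptoms disease_candidates confirmed_symptoms disease_data skipped_symptoms → Spec_has_remaining_symptoms disease_candidates confirmed_symptoms disease_data skipped_symptoms (has_remaining_symptoms disease_candidates confirmed_symptoms disease_data skipped_symptoms)

-- ===== LEMMAS AND PROOFS =====

-- symptoms attached to one disease (abbreviation used only by the proofs)
def hrsSym (dd : List (String × List (String × List String))) (d : String) : List String :=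
  PySem.Dict.getD (PySem.Dict.mk ((PySem.Dict.mk dd).getD d [])) "symptoms" []

lemma hrsLoopA_iff (dd : List (String × List (String × List String)))
    (al : PySem.Set String) (cs : List String) :
    hrsLoopA dd al cs = true ↔
      ∃ d ∈ cs, (PySem.Dict.mk dd).contains d = true ∧ ∃ s ∈ hrsSym dd d, s ∉ al := by
  induction cs with
  | nil =>
    constructor
    · intro h; cases h
    · rintro ⟨d, hd, _⟩; cases hd
  | cons d rest ih =>
    simp only [hrsLoopA, hrsSym] at *
    by_cases hc : (PySem.Dict.mk dd).contains d = false
    · rw [if_pos hc, ih]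
      constructor
      · rintro ⟨x, hx, h⟩; exact ⟨x, List.mem_cons_of_mem _ hx, h⟩
      · rintro ⟨x, hx, h⟩
        rcases List.mem_cons.mp hx with rfl | hx'
        · rw [h.1] at hc; cases hc
        · exact ⟨x, hx', h⟩
    · have hc' : (PySem.Dict.mk dd).contains d = true := by
        cases h : (PySem.Dict.mk dd).contains d
        · exact absurd h hc
        · rfl
      rw [if_neg hc]
      by_cases hr : ((PySem.Dict.getD (PySem.Dict.mk ((PySem.Dict.mk dd).getD d [])) "symptoms" []).filter
          (fun s => !(PySem.Set.contains al s))).isEmpty = false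
      · rw [if_pos hr]
        rw [List.isEmpty_eq_false_iff_exists_mem] at hr
        obtain ⟨s, hs⟩ := hr
        rw [List.mem_filter] at hs
        constructor
        · intro _
          exact ⟨d, List.mem_cons_self, hc', s, hs.1, by simpa using hs.2⟩
        · intro _; rfl
      · have hr' : ((PySem.Dict.getD (PySem.Dict.mk ((PySem.Dict.mk dd).getD d [])) "symptoms" []).filter
            (fun s => !(PySem.Set.contains al s))) = [] := by
          rw [← List.isEmpty_iff]
          cases h : ((PySem.Dict.getD (PySem.Dict.mk ((PySem.Dict.mk dd).getD d [])) "symptoms" []).filter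
            (fun s => !(PySem.Set.contains al s))).isEmpty
          · exact absurd h hr
          · rfl
        rw [if_neg hr, ih]
        constructor
        · rintro ⟨x, hx, h⟩; exact ⟨x, List.mem_cons_of_mem _ hx, h⟩
        · rintro ⟨x, hx, h⟩
          rcases List.mem_cons.mp hx with rfl | hx'
          · exfalso
            obtain ⟨_, s, hs, hns⟩ := h
            rw [List.filter_eq_nil_iff] at hr'
            have := hr' s hs
            simp at this
            exact hns this
          · exact ⟨x, hx', h⟩

lemma hrsFoldB_mem (dd : List (String × List (String × List String)))
    (y : String) (cs : List String) (s0 : PySem.Set String) :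
    y ∈ cs.foldl (fun acc disease =>
        if (PySem.Dict.mk dd).contains disease then
          PySem.Set.union acc (PySem.Set.ofList (PySem.Dict.getD (PySem.Dict.mk ((PySem.Dict.mk dd).getD disease [])) "symptoms" []))
        else acc) s0 ↔
      y ∈ s0 ∨ ∃ d ∈ cs, (PySem.Dict.mk dd).contains d = true ∧ y ∈ hrsSym dd d := by
  induction cs generalizing s0 with
  | nil =>
    constructor
    · exact Or.inl
    · rintro (h | ⟨d, hd, _⟩)
      · exact h
      · cases hd
  | cons d rest ih =>
    simp only [List.foldl_cons, hrsSym] at *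
    by_cases hc : (PySem.Dict.mk dd).contains d
    · rw [if_pos hc, ih]
      simp only [PySem.Set.mem_union, PySem.Set.mem_ofList]
      constructor
      · rintro ((h | h) | ⟨x, hx, h1, h2⟩)
        · exact Or.inl h
        · exact Or.inr ⟨d, List.mem_cons_self, hc, h⟩
        · exact Or.inr ⟨x, List.mem_cons_of_mem _ hx, h1, h2⟩
      · rintro (h | ⟨x, hx, h1, h2⟩)
        · exact Or.inl (Or.inl h)
        · rcases List.mem_cons.mp hx with rfl | hx'
          · exact Or.inl (Or.inr h2)
          · exact Or.inr ⟨x, hx', h1, h2⟩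
    · rw [if_neg hc, ih]
      simp only [Bool.not_eq_true] at hc
      constructor
      · rintro (h | ⟨x, hx, h1, h2⟩)
        · exact Or.inl h
        · exact Or.inr ⟨x, List.mem_cons_of_mem _ hx, h1, h2⟩
      · rintro (h | ⟨x, hx, h1, h2⟩)
        · exact Or.inl h
        · rcases List.mem_cons.mp hx with rfl | hx'
          · rw [hc] at h1; cases h1
          · exact Or.inr ⟨x, hx', h1, h2⟩

-- ===== VERDICT (by name: the statement is the Claim_ definition above) =====
theorem has_remaining_symptoms_spec : Claim_equal_has_remaining_symptoms := by
  intro dc cs dd sk _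
  show has_remaining_symptoms dc cs dd sk = has_remaining_symptoms_alt dc cs dd sk
  simp only [has_remaining_symptoms, has_remaining_symptoms_alt]
  rw [Bool.eq_iff_iff, hrsLoopA_iff, Bool.not_eq_true', List.isEmpty_eq_false_iff_exists_mem]
  constructor
  · rintro ⟨d, hd, hc, s, hs, hns⟩
    refine ⟨s, ?_⟩
    rw [PySem.Set.mem_diff, hrsFoldB_mem]
    exact ⟨Or.inr ⟨d, hd, hc, hs⟩, hns⟩
  · rintro ⟨s, hs⟩
    rw [PySem.Set.mem_diff, hrsFoldB_mem] at hs
    rcases hs with ⟨h | ⟨d, hd, hc, hsym⟩, hns⟩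
    · cases h
    · exact ⟨d, hd, hc, s, hsym, hns⟩
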